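-- pv_equiv track=rewrite | github.com/Terry-HUSTER/public | answer.py | subsequence_counts
-- ===== SOURCE A (Python) =====
-- def subsequence_counts(source, target):
--     #判断是否有source中未出现字符
--     st = set(source)
--     for char in target:
--         if char not in st:
--             return -1
--
--     count = 0
--     i = 0
--
--     while i < len(target):
--         j = 0
--         while j < len(source) and i < len(target):
--             if source[j] == target[i]:
--                 i += 1
--             j += 1
--         count += 1
--
--     return count
-- ===== SOURCE B (Python) =====
-- def subsequence_counts(source, target):
--     # Precompute, per character, the sorted list of its positions in source;
--     # then match target by binary-searching the next position, never scanning
--     # source during matching.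
--     pos = {}
--     for idx, ch in enumerate(source):
--         pos.setdefault(ch, []).append(idx)
--     count = 1 if target else 0
--     cur = 0
--     for c in target:
--         ps = pos.get(c, [])
--         if not ps:
--             return -1
--         # first position in ps that is >= cur (hand-rolled bisect_left)
--         lo, hi = 0, len(ps)
--         while lo < hi:
--             mid = (lo + hi) // 2
--             if ps[mid] < cur:
--                 lo = mid + 1
--             else:
--                 hi = mid
--         if lo == len(ps):
--             count += 1
--             cur = ps[0] + 1
--         else:
--             cur = ps[lo] + 1
--     return count
-- ===== Notes on version B (the rewrite author's own statement) =====
-- stated objective: alternative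
-- what changed: A repeatedly rescans source character by character against the remaining target; B precomputes a dict mapping each character to its sorted list of positions in source, then matches target with a hand-rolled binary search per character into that index, never scanning source during matching.
import Mathlib
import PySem

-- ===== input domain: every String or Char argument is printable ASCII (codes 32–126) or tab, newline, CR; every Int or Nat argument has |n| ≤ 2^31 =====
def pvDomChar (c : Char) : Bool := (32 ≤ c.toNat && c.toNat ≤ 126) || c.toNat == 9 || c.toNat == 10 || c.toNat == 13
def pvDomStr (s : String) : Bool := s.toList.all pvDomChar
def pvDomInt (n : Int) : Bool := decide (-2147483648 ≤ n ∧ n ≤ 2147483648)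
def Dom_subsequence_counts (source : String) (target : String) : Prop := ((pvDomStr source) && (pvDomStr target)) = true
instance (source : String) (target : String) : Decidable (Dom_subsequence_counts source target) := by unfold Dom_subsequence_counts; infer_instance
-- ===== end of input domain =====

-- B replaces A's repeated rescans of source with a per-character position index
-- (dict of sorted occurrence lists) queried by binary search; return value only.

-- ===== PORT A =====
-- the 'for char in target: if char not in st: return -1' loop
def scMissing (st : PySem.Set Char) : List Char → Bool
  | [] => false
  | c :: rest => if !(PySem.Set.contains st c) then true else scMissing st rest

-- inner 'while j < len(source) and i < len(target)' loop; returns the new i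
def scInner (s t : List Char) (j i : Nat) : Nat :=
  if h : j < s.length ∧ i < t.length then
    if s[j]'h.1 = t[i]'h.2 then scInner s t (j + 1) (i + 1)
    else scInner s t (j + 1) i
  else i
termination_by s.length - j

-- outer 'while i < len(target)' loop; fuel only makes the recursion total:
-- after the membership check every pass advances i, so fuel len(target)+1 is never exhausted
def scOuter (s t : List Char) : Nat → Nat → Int → Int
  | 0, _, count => count
  | fuel + 1, i, count =>
      if i < t.length then scOuter s t fuel (scInner s t 0 i) (count + 1)
      else count

def subsequence_counts (source : String) (target : String) : Int :=
  let s := source.toList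
  let t := target.toList
  let st := PySem.Set.ofList s
  if scMissing st t then -1
  else scOuter s t (t.length + 1) 0 0

-- ===== PORT B =====
-- 'for idx, ch in enumerate(source): pos.setdefault(ch, []).append(idx)'
-- (setdefault-then-append = d[ch] = d.get(ch, []) + [idx], i.e. Dict.modify)
def scBuild (d : PySem.Dict Char (List Nat)) : List Char → Nat → PySem.Dict Char (List Nat)
  | [], _ => d
  | c :: rest, idx => scBuild (d.modify c [] (· ++ [idx])) rest (idx + 1)

-- the hand-rolled bisect_left loop 'while lo < hi: …' of Source B
def scBisect (ps : List Nat) (cur : Nat) (lo hi : Nat) : Nat :=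
  if lo < hi then
    if ps.getD ((lo + hi) / 2) 0 < cur then scBisect ps cur ((lo + hi) / 2 + 1) hi
    else scBisect ps cur lo ((lo + hi) / 2)
  else lo
termination_by hi - lo
decreasing_by all_goals omega

-- the 'for c in target' loop of Source B
def scLoop (pos : PySem.Dict Char (List Nat)) : List Char → Nat → Int → Int
  | [], _, count => count
  | c :: rest, cur, count =>
      let ps := pos.getD c []
      if ps = [] then -1
      else
        let lo := scBisect ps cur 0 ps.length
        if lo = ps.length then scLoop pos rest (ps.headD 0 + 1) (count + 1)
        else scLoop pos rest (ps.getD lo 0 + 1) count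

def subsequence_counts_alt (source : String) (target : String) : Int :=
  let s := source.toList
  let t := target.toList
  let pos := scBuild PySem.Dict.empty s 0
  scLoop pos t 0 (if t.isEmpty then 0 else 1)

-- ===== PRECONDITION & SPEC =====
def Spec_subsequence_counts (source : String) (target : String) (out : Int) : Prop := out = subsequence_counts_alt source target
instance (source : String) (target : String) (out : Int) : Decidable (Spec_subsequence_counts source target out) := by unfold Spec_subsequence_counts; infer_instance

-- ===== CLAIM (what is proved, stated in full; the proofs are below) =====
def Claim_equal_subsequence_counts : Prop := ∀ (source : String) (target : String), Dom_subsequence_counts source target → Spec_subsequence_counts source target (subsequence_counts source target)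

-- ===== LEMMAS AND PROOFS =====

-- proof-side middleman: first index k ≥ j with s[k] = c (Python str.find(c, j))
def scFindFrom (s : List Char) (c : Char) (j : Nat) : Option Nat :=
  if h : j < s.length then
    if s[j]'h = c then some j else scFindFrom s c (j + 1)
  else none
termination_by s.length - j

-- proof-side greedy loop: scLoop with the dict+bisect step replaced by scFindFrom
def scGreedy (s : List Char) : List Char → Nat → Int → Int
  | [], _, count => count
  | c :: rest, cur, count =>
      match scFindFrom s c cur with
      | some k => scGreedy s rest (k + 1) count
      | none =>
          match scFindFrom s c 0 with
          | some k => scGreedy s rest (k + 1) (count + 1)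
          | none => -1

-- the occurrence-position list of c in s (what scBuild stores under key c)
def scOcc (s : List Char) (c : Char) : List Nat :=
  ((s.zipIdx).filter (fun p => p.1 == c)).map (·.2)

theorem scFindFrom_none (s : List Char) (c : Char) :
    ∀ n j, s.length - j ≤ n →
    (scFindFrom s c j = none ↔ ∀ k, j ≤ k → (h : k < s.length) → s[k] ≠ c) := by
  intro n
  induction n with
  | zero =>
      intro j hj
      have hjs : ¬ j < s.length := by omega
      rw [scFindFrom, dif_neg hjs]
      simp only [true_iff]
      intro k hk hlt; omega
  | succ n ih =>
      intro j hj
      by_cases hjs : j < s.length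
      · rw [scFindFrom, dif_pos hjs]
        by_cases he : s[j]'hjs = c
        · rw [if_pos he]
          constructor
          · intro h; exact absurd h (by simp)
          · intro H; exact absurd he (H j le_rfl hjs)
        · rw [if_neg he, ih (j + 1) (by omega)]
          constructor
          · intro H k hk hlt
            rcases Nat.eq_or_lt_of_le hk with rfl | hk'
            · exact he
            · exact H k hk' hlt
          · intro H k hk hlt; exact H k (Nat.le_of_succ_le hk) hlt
      · rw [scFindFrom, dif_neg hjs]
        simp only [true_iff]
        intro k hk hlt; omega

theorem scFindFrom_zero_none (s : List Char) (c : Char) :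
    scFindFrom s c 0 = none ↔ c ∉ s := by
  rw [scFindFrom_none s c s.length 0 (by omega)]
  constructor
  · intro H hc
    obtain ⟨k, hk, hck⟩ := List.getElem_of_mem hc
    exact H k (Nat.zero_le k) hk hck
  · intro hc k _ hlt hk
    exact hc (hk ▸ List.getElem_mem hlt)

-- uniqueness form: a first match determines scFindFrom
theorem scFindFrom_eq_some (s : List Char) (c : Char) :
    ∀ n j k, s.length - j ≤ n → j ≤ k → (hk : k < s.length) → s[k] = c →
    (∀ m, j ≤ m → m < k → (h : m < s.length) → s[m] ≠ c) →
    scFindFrom s c j = some k := by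
  intro n
  induction n with
  | zero => intro j k hj hjk hk _ _; omega
  | succ n ih =>
      intro j k hj hjk hk hck hmin
      have hjs : j < s.length := by omega
      rw [scFindFrom, dif_pos hjs]
      by_cases he : s[j]'hjs = c
      · rcases Nat.eq_or_lt_of_le hjk with rfl | hlt
        · rw [if_pos he]
        · exact absurd he (hmin j le_rfl hlt hjs)
      · have hjk' : j + 1 ≤ k := by
          rcases Nat.eq_or_lt_of_le hjk with rfl | hlt
          · exact absurd hck he
          · omega
        rw [if_neg he]
        exact ih (j + 1) k (by omega) hjk' hk hck
          (fun m hm hmk h => hmin m (by omega) hmk h)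

-- membership in the occurrence list
theorem scOcc_mem (s : List Char) (c : Char) (k : Nat) :
    k ∈ scOcc s c ↔ ∃ h : k < s.length, s[k] = c := by
  unfold scOcc
  simp only [List.mem_map, List.mem_filter]
  constructor
  · rintro ⟨⟨x, i⟩, ⟨hmem, hx⟩, rfl⟩
    have := List.mk_mem_zipIdx_iff_getElem?.mp hmem
    have hi : i < s.length := by
      rcases List.getElem?_eq_some_iff.mp this with ⟨h, _⟩; exact h
    refine ⟨hi, ?_⟩
    have hsx : s[i] = x := by
      rcases List.getElem?_eq_some_iff.mp this with ⟨h, hv⟩; exact hv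
    rw [hsx]; exact eq_of_beq hx
  · rintro ⟨hk, hck⟩
    refine ⟨(c, k), ⟨?_, by simp⟩, rfl⟩
    exact List.mk_mem_zipIdx_iff_getElem?.mpr (by simp [hck.symm ▸ List.getElem?_eq_getElem hk])

-- the occurrence list is strictly increasing
theorem scOcc_pairwise (s : List Char) (c : Char) :
    (scOcc s c).Pairwise (· < ·) := by
  unfold scOcc
  refine (List.pairwise_map).2 (List.Pairwise.filter _ ?_)
  have : (s.zipIdx).Pairwise (fun p q : Char × Nat => p.2 < q.2) := by
    rw [List.pairwise_iff_getElem]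
    intro i j hi hj hij
    rw [List.getElem_zipIdx, List.getElem_zipIdx]
    simpa using hij
  exact this

theorem scOcc_nil_iff (s : List Char) (c : Char) :
    scOcc s c = [] ↔ c ∉ s := by
  constructor
  · intro h hc
    obtain ⟨k, hk, hck⟩ := List.getElem_of_mem hc
    have : k ∈ scOcc s c := (scOcc_mem s c k).mpr ⟨hk, hck⟩
    simp [h] at this
  · intro hc
    rcases hocc : scOcc s c with _ | ⟨k, rest⟩
    · rfl
    · have : k ∈ scOcc s c := by rw [hocc]; exact List.mem_cons_self
      rcases (scOcc_mem s c k).mp this with ⟨hk, hck⟩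
      exact absurd (hck ▸ List.getElem_mem hk) hc

-- scBuild stores exactly the occurrence lists (fold form, then getD)
theorem scBuild_eq_foldl (cs : List Char) :
    ∀ (d : PySem.Dict Char (List Nat)) (idx : Nat),
    scBuild d cs idx = (cs.zipIdx idx).foldl (fun d p => d.modify p.1 [] (· ++ [p.2])) d := by
  induction cs with
  | nil => intro d idx; simp [scBuild]
  | cons c rest ih =>
      intro d idx
      rw [scBuild, List.zipIdx_cons, List.foldl_cons, ih]

theorem scBuild_getD (s : List Char) (c : Char) :
    (scBuild PySem.Dict.empty s 0).getD c [] = scOcc s c := by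
  rw [scBuild_eq_foldl, PySem.Dict.getD_foldl_modify_append, PySem.Dict.getD_empty]
  unfold scOcc
  simp

-- bisect_left invariant: the result splits ps at the first element ≥ cur
theorem scBisect_spec (ps : List Nat) (cur : Nat) (hsort : ps.Pairwise (· < ·)) :
    ∀ n lo hi, hi - lo ≤ n → lo ≤ hi → hi ≤ ps.length →
    (∀ m, m < lo → (h : m < ps.length) → ps[m] < cur) →
    (∀ m (h : m < ps.length), hi ≤ m → cur ≤ ps[m]) →
    scBisect ps cur lo hi ≤ ps.length ∧
    (∀ m, m < scBisect ps cur lo hi → (h : m < ps.length) → ps[m] < cur) ∧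
    (∀ m (h : m < ps.length), scBisect ps cur lo hi ≤ m → cur ≤ ps[m]) := by
  have hmono : ∀ a b (hb : b < ps.length) (hab : a ≤ b), ps[a]'(by omega) ≤ ps[b]'hb := by
    intro a b hb hab
    rcases Nat.eq_or_lt_of_le hab with rfl | hlt
    · exact le_rfl
    · exact le_of_lt ((List.pairwise_iff_getElem.mp hsort) a b (by omega) hb hlt)
  intro n
  induction n with
  | zero =>
      intro lo hi hn hlh hhl hlo hhi
      have : ¬ lo < hi := by omega
      rw [scBisect, if_neg this]
      exact ⟨by omega, fun m hm h => hlo m (by omega) h, fun m h hm => hhi m h (by omega)⟩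
  | succ n ih =>
      intro lo hi hn hlh hhl hlo hhi
      by_cases hlt : lo < hi
      · rw [scBisect, if_pos hlt]
        have hmid : (lo + hi) / 2 < hi ∧ lo ≤ (lo + hi) / 2 := by omega
        have hmlen : (lo + hi) / 2 < ps.length := by omega
        rw [List.getD_eq_getElem ps 0 hmlen]
        by_cases hc : ps[(lo + hi) / 2] < cur
        · rw [if_pos hc]
          refine ih ((lo + hi) / 2 + 1) hi (by omega) (by omega) hhl ?_ hhi
          intro m hm h
          exact lt_of_le_of_lt (hmono m ((lo + hi) / 2) hmlen (by omega)) hc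
        · rw [if_neg hc]
          refine ih lo ((lo + hi) / 2) (by omega) (by omega) (by omega) hlo ?_
          intro m h hm
          exact le_trans (Nat.le_of_not_lt hc) (hmono ((lo + hi) / 2) m h hm)
      · rw [scBisect, if_neg hlt]
        exact ⟨by omega, fun m hm h => hlo m (by omega) h, fun m h hm => hhi m h (by omega)⟩

-- step lemma, wrap case: all positions < cur ⟹ no occurrence at or after cur
theorem scStep_none (s : List Char) (c : Char) (cur : Nat)
    (H : ∀ m, (h : m < (scOcc s c).length) → (scOcc s c)[m] < cur) :
    scFindFrom s c cur = none := by
  rw [scFindFrom_none s c s.length cur (by omega)]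
  intro k hk hlt hck
  have hkmem : k ∈ scOcc s c := (scOcc_mem s c k).mpr ⟨hlt, hck⟩
  obtain ⟨m, hm, hmk⟩ := List.getElem_of_mem hkmem
  have := H m hm
  omega

-- step lemma, hit case: scFindFrom returns the first position ≥ cur
theorem scStep_some (s : List Char) (c : Char) (cur : Nat) (r : Nat)
    (hr : r < (scOcc s c).length)
    (hlow : ∀ m, m < r → (h : m < (scOcc s c).length) → (scOcc s c)[m] < cur)
    (hge : cur ≤ (scOcc s c)[r]) :
    scFindFrom s c cur = some ((scOcc s c)[r]) := by
  have hsort := scOcc_pairwise s c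
  rcases (scOcc_mem s c _).mp (List.getElem_mem hr) with ⟨hlen, hck⟩
  refine scFindFrom_eq_some s c s.length cur _ (by omega) hge hlen hck ?_
  intro m hcm hmr h hcm'
  have hmmem : m ∈ scOcc s c := (scOcc_mem s c m).mpr ⟨h, hcm'⟩
  obtain ⟨i, hi, him⟩ := List.getElem_of_mem hmmem
  by_cases hir : i < r
  · have := hlow i hir hi; omega
  · have : (scOcc s c)[r] ≤ (scOcc s c)[i] := by
      rcases Nat.eq_or_lt_of_le (Nat.le_of_not_lt hir) with rfl | hlt
      · exact le_rfl
      · exact le_of_lt ((List.pairwise_iff_getElem.mp hsort) r i hr hi hlt)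
    omega

-- B's loop equals the greedy scFindFrom loop
theorem scLoop_eq_scGreedy (s : List Char) (t : List Char) :
    ∀ cur count, scLoop (scBuild PySem.Dict.empty s 0) t cur count = scGreedy s t cur count := by
  induction t with
  | nil => intro cur count; rfl
  | cons c rest ih =>
      intro cur count
      rw [scLoop, scGreedy]
      simp only [scBuild_getD]
      by_cases hnil : scOcc s c = []
      · rw [if_pos hnil]
        have h0 : scFindFrom s c 0 = none :=
          (scFindFrom_zero_none s c).mpr ((scOcc_nil_iff s c).mp hnil)
        have hcur : scFindFrom s c cur = none := by
          rw [scFindFrom_none s c s.length cur (by omega)]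
          rw [scFindFrom_none s c s.length 0 (by omega)] at h0
          exact fun k _ h => h0 k (Nat.zero_le k) h
        rw [hcur, h0]
      · rw [if_neg hnil]
        obtain ⟨hle, hlow, hge⟩ :=
          scBisect_spec (scOcc s c) cur (scOcc_pairwise s c) (scOcc s c).length 0
            (scOcc s c).length (by omega) (by omega) le_rfl (by omega)
            (fun m h hm => by omega)
        by_cases hr : scBisect (scOcc s c) cur 0 (scOcc s c).length = (scOcc s c).length
        · rw [if_pos hr]
          have hnone : scFindFrom s c cur = none :=
            scStep_none s c cur (fun m h => hlow m (by omega) h)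
          have hpos : 0 < (scOcc s c).length := List.length_pos_iff.mpr hnil
          have hfirst : scFindFrom s c 0 = some ((scOcc s c)[0]) :=
            scStep_some s c 0 0 hpos (by omega) (Nat.zero_le _)
          rw [hnone, hfirst, ih]
          congr 1
          obtain ⟨p, ps', hocc⟩ : ∃ p ps', scOcc s c = p :: ps' := by
            rcases h : scOcc s c with _ | ⟨p, ps'⟩
            · exact absurd h hnil
            · exact ⟨p, ps', rfl⟩
          simp [hocc]
        · rw [if_neg hr]
          have hrlt : scBisect (scOcc s c) cur 0 (scOcc s c).length < (scOcc s c).length := by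
            omega
          have hsome := scStep_some s c cur _ hrlt (fun m hm h => hlow m hm h)
            (hge _ hrlt le_rfl)
          rw [hsome, ih]
          congr 1
          rw [List.getD_eq_getElem _ 0 hrlt]

theorem scMissing_iff (s t : List Char) :
    scMissing (PySem.Set.ofList s) t = true ↔ ∃ c ∈ t, c ∉ s := by
  induction t with
  | nil => simp [scMissing]
  | cons c rest ih =>
      have hcc : PySem.Set.contains (PySem.Set.ofList s) c = true ↔ c ∈ s := by
        rw [PySem.Set.contains_iff, PySem.Set.mem_ofList]
      by_cases hc : c ∈ s
      · rw [scMissing, if_neg (by simp [hc]), ih]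
        simp [hc]
      · rw [scMissing, if_pos (by
          simp only [Bool.not_eq_eq_eq_not, Bool.not_true]
          rw [Bool.eq_false_iff]
          intro h
          exact hc (hcc.mp h))]
        simp [hc]

-- if some target char is absent, the greedy loop ends in -1 from any state
theorem scGreedy_missing (s : List Char) (t : List Char)
    (h : ∃ c ∈ t, c ∉ s) : ∀ cur count, scGreedy s t cur count = -1 := by
  induction t with
  | nil => simp at h
  | cons c rest ih =>
      intro cur count
      rcases h with ⟨d, hd, hds⟩
      rcases List.mem_cons.mp hd with rfl | hmem
      · have h0 : scFindFrom s d 0 = none := (scFindFrom_zero_none s d).mpr hds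
        have hcur : scFindFrom s d cur = none := by
          rw [scFindFrom_none s d s.length 0 (by omega)] at h0
          rw [scFindFrom_none s d s.length cur (by omega)]
          exact fun k _ hlt => h0 k (Nat.zero_le k) hlt
        simp [scGreedy, hcur, h0]
      · cases hfc : scFindFrom s c cur with
        | some k => simp only [scGreedy, hfc]; exact ih ⟨d, hmem, hds⟩ _ _
        | none =>
            cases hf0 : scFindFrom s c 0 with
            | some k => simp only [scGreedy, hfc, hf0]; exact ih ⟨d, hmem, hds⟩ _ _
            | none => simp [scGreedy, hfc, hf0]

-- characterisation of A's inner pass loop: one greedy find step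
theorem scInner_char (s t : List Char) :
    ∀ n j i, s.length - j ≤ n → (hi : i < t.length) →
    scInner s t j i =
      match scFindFrom s (t[i]'hi) j with
      | some k => scInner s t (k + 1) (i + 1)
      | none => i := by
  intro n
  induction n with
  | zero =>
      intro j i hj hi
      have hjs : ¬ j < s.length := by omega
      rw [scFindFrom, dif_neg hjs, scInner]
      rw [dif_neg (by omega)]
  | succ n ih =>
      intro j i hj hi
      by_cases hjs : j < s.length
      · rw [scFindFrom, dif_pos hjs, scInner, dif_pos ⟨hjs, hi⟩]
        by_cases he : s[j]'hjs = t[i]'hi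
        · rw [if_pos he, if_pos he]
        · rw [if_neg he, if_neg he]
          exact ih (j + 1) i (by omega) hi
      · rw [scFindFrom, dif_neg hjs, scInner, dif_neg (by omega)]

-- main bridge: the greedy loop from the middle of a pass equals finishing the pass
-- with scInner and continuing with scOuter (count already includes the current pass)
theorem scBridge (s t : List Char) (hall : ∀ c ∈ t, c ∈ s) :
    ∀ n i cur count fuel, t.length - i = n → t.length - i ≤ fuel →
    scGreedy s (t.drop i) cur count = scOuter s t fuel (scInner s t cur i) count := by
  intro n
  induction n with
  | zero =>
      intro i cur count fuel hn _
      by_cases hi : i < t.length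
      · omega
      · have hdrop : t.drop i = [] := List.drop_eq_nil_of_le (by omega)
        have hinner : scInner s t cur i = i := by
          rw [scInner, dif_neg (by omega)]
        rw [hdrop, hinner]
        cases fuel with
        | zero => simp [scGreedy, scOuter]
        | succ f => simp [scGreedy, scOuter, hi]
  | succ n ih =>
      intro i cur count fuel hn hfuel
      have hi : i < t.length := by omega
      have hdrop : t.drop i = (t[i]'hi) :: t.drop (i + 1) := List.drop_eq_getElem_cons hi
      rw [hdrop]
      cases hfc : scFindFrom s (t[i]'hi) cur with
      | some k =>
          have hIH := ih (i + 1) (k + 1) count fuel (by omega) (by omega)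
          rw [scGreedy, hfc]
          rw [scInner_char s t s.length cur i (by omega) hi, hfc]
          exact hIH
      | none =>
          have hmem : (t[i]'hi) ∈ s := hall _ (List.getElem_mem hi)
          cases hf0 : scFindFrom s (t[i]'hi) 0 with
          | none => exact absurd ((scFindFrom_zero_none s _).mp hf0) (by simp [hmem])
          | some k =>
              have hinner_cur : scInner s t cur i = i := by
                rw [scInner_char s t s.length cur i (by omega) hi, hfc]
              have hinner0 : scInner s t 0 i = scInner s t (k + 1) (i + 1) := by
                rw [scInner_char s t s.length 0 i (by omega) hi, hf0]
              obtain ⟨f, rfl⟩ : ∃ f, fuel = f + 1 := ⟨fuel - 1, by omega⟩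
              have hIH := ih (i + 1) (k + 1) (count + 1) f (by omega) (by omega)
              rw [scGreedy, hfc, hf0, hinner_cur, scOuter, if_pos hi, hinner0]
              exact hIH

-- A's body equals the greedy loop, stated over the character lists
theorem scMain (s t : List Char) :
    (if scMissing (PySem.Set.ofList s) t then (-1 : Int) else scOuter s t (t.length + 1) 0 0)
      = scGreedy s t 0 (if t.isEmpty then 0 else 1) := by
  by_cases hmiss : ∃ c ∈ t, c ∉ s
  · rw [if_pos ((scMissing_iff s t).mpr hmiss), scGreedy_missing s t hmiss]
  · rw [if_neg (by
      rw [Bool.not_eq_true, Bool.eq_false_iff]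
      exact fun h => hmiss ((scMissing_iff s t).mp h))]
    replace hmiss : ∀ c ∈ t, c ∈ s := fun c hc => not_not.mp (fun h => hmiss ⟨c, hc, h⟩)
    by_cases ht : t = []
    · subst ht; simp [scGreedy, scOuter]
    · have hlen : 0 < t.length := List.length_pos_iff.mpr ht
      have hte : t.isEmpty = false := by simp [ht]
      have hb := scBridge s t hmiss t.length 0 0 1 t.length (by omega) (by omega)
      rw [List.drop_zero] at hb
      simp only [hte, Bool.false_eq_true, if_false, scOuter, if_pos hlen]
      norm_num [hb]

-- ===== VERDICT (by name: the statement is the Claim_ definition above) =====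
theorem subsequence_counts_spec : Claim_equal_subsequence_counts := by
  intro source target _
  unfold Spec_subsequence_counts
  simp only [subsequence_counts, subsequence_counts_alt]
  rw [scLoop_eq_scGreedy]
  exact scMain source.toList target.toList
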